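-- pv_equiv track=rewrite | github.com/magicalme687/academix_studio | seat_manager/views.py | get_active_pattern
-- ===== SOURCE A (Python) =====
-- def get_active_pattern(year_dict, cols, base_pattern=None, include_empty=False):
--     """Generate the repeating pattern of years for columns."""
--     if not base_pattern:
--         base_pattern = ["IV Yr", "III Yr", "II Yr", "I Yr"]
--     # Only include the year if it was requested (in year_dict) and actually has students left
--     if include_empty:
--         active_years = [y for y in base_pattern if y in year_dict]
--     else:
--         active_years = [y for y in base_pattern if y in year_dict and len(year_dict[y]) > 0]
--     pattern = []
--
--     if not active_years:
--         return []
--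
--     # If only one year is active overall, interleave with empty columns to prevent cheating
--     if len(active_years) == 1:
--         while len(pattern) < cols:
--             pattern.append(active_years[0])
--             if len(pattern) < cols:
--                 pattern.append("") # Insert empty column
--         return pattern
--
--     while len(pattern) < cols:
--         for y in active_years:
--             if len(pattern) >= cols:
--                 break
--
--             # If the year we are about to add is identical to the last column added,
--             # we MUST insert an empty column first to prevent side-by-side cheating.
--             if len(pattern) > 0 and pattern[-1] == y:
--                 pattern.append("")
--                 if len(pattern) >= cols:
--                     break
--
--             pattern.append(y)
--
--     return pattern
-- ===== SOURCE B (Python) =====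
-- def get_active_pattern(year_dict, cols, base_pattern=None, include_empty=False):
--     """Precompute the finite repeating period once (adjacent-dedup expansion of one
--     pass, plus a leading "" when the cycle wraps onto an equal year), then produce
--     the answer by list replication and a single slice -- no per-column loop."""
--     active = [y for y in (base_pattern or ["IV Yr", "III Yr", "II Yr", "I Yr"])
--               if y in year_dict and (include_empty or len(year_dict[y]) > 0)]
--     if not active or cols <= 0:
--         return []
--     # first pass: insert "" between adjacent equal years
--     first = [active[0]]
--     for y in active[1:]:
--         if y == first[-1]:
--             first.append("")
--         first.append(y)
--     # every later pass is identical, preceded by "" iff the cycle wraps onto itself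
--     period = ([""] if active[-1] == active[0] else []) + first
--     reps = cols // len(period) + 1
--     return (first + period * reps)[:cols]
-- ===== Notes on version B (the rewrite author's own statement) =====
-- stated objective: alternative
-- what changed: Replaces A's per-column emission loops (a special single-year interleave loop plus a nested while/for with breaks) by precomputing the finite repeating period once and building the answer with list replication and one slice.
import Mathlib
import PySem

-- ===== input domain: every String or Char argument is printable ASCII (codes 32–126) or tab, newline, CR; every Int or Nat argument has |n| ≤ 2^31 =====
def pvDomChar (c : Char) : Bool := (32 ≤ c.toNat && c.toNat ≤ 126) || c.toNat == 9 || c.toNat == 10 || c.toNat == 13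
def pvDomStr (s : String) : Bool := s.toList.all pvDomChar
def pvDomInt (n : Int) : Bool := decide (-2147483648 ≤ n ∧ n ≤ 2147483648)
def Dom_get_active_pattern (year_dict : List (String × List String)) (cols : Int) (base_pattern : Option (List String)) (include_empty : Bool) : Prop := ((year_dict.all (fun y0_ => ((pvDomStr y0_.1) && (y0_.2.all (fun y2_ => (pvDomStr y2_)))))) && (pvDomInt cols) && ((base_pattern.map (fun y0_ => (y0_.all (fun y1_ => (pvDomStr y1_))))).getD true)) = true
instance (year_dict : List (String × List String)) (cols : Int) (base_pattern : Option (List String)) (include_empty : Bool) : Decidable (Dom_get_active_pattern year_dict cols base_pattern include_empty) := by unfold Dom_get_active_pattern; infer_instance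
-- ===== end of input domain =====

-- B replaces A's per-column emission loops (single-year interleave + nested while/for with
-- breaks) by precomputing the finite repeating period once, then list replication + one slice.
set_option maxHeartbeats 1000000


-- ===== PORT A =====

-- A's single-active-year while loop: append the year, then (if room) an empty column.
def pvALoopSingle (y : String) (cols : Int) (pattern : List String) : List String :=
  if _h : (pattern.length : Int) < cols then
    let p1 := pattern ++ [y]
    if (p1.length : Int) < cols then pvALoopSingle y cols (p1 ++ [""]) else p1
  else pattern
termination_by (cols - pattern.length).toNat
decreasing_by simp only [List.length_append, List.length_cons, List.length_nil]; omega

-- A's inner 'for y in active_years' body; returning the pattern models 'break'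
-- (the outer while re-checks the same condition and returns it unchanged).
def pvAInner (cols : Int) (ys : List String) (pattern : List String) : List String :=
  match ys with
  | [] => pattern
  | y :: rest =>
    if (pattern.length : Int) ≥ cols then pattern
    else if decide (0 < pattern.length) && (pattern.getLast? == some y) then
      let p := pattern ++ [""]
      if (p.length : Int) ≥ cols then p
      else pvAInner cols rest (p ++ [y])
    else pvAInner cols rest (pattern ++ [y])

-- termination facts for pvAOuter (cited by its decreasing_by)
theorem pvAInner_length_le (cols : Int) (ys pattern : List String) :
    pattern.length ≤ (pvAInner cols ys pattern).length := by
  induction ys generalizing pattern with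
  | nil => simp [pvAInner]
  | cons y rest ih =>
    simp only [pvAInner]
    split
    · exact le_rfl
    · split
      · split
        · simp
        · exact le_trans (by simp) (ih (pattern ++ [""] ++ [y]))
      · exact le_trans (by simp) (ih (pattern ++ [y]))

theorem pvAInner_length_lt (cols : Int) (y : String) (rest pattern : List String)
    (h : (pattern.length : Int) < cols) :
    pattern.length < (pvAInner cols (y :: rest) pattern).length := by
  simp only [pvAInner]
  rw [if_neg (by omega)]
  split
  · split
    · simp
    · exact lt_of_lt_of_le (by simp) (pvAInner_length_le cols rest (pattern ++ [""] ++ [y]))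
  · exact lt_of_lt_of_le (by simp) (pvAInner_length_le cols rest (pattern ++ [y]))

-- A's outer 'while len(pattern) < cols' loop; the [] branch is only a totality guard
-- (A reaches this loop only with a nonempty active_years).
def pvAOuter (cols : Int) (ys : List String) (pattern : List String) : List String :=
  match ys with
  | [] => pattern
  | y :: rest =>
    if _h : (pattern.length : Int) < cols then
      pvAOuter cols (y :: rest) (pvAInner cols (y :: rest) pattern)
    else pattern
termination_by (cols - pattern.length).toNat
decreasing_by
  have := pvAInner_length_lt cols y rest pattern _h
  omega

def get_active_pattern (year_dict : List (String × List String)) (cols : Int) (base_pattern : Option (List String)) (include_empty : Bool) : List String :=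
  let d := PySem.Dict.ofList year_dict
  let bp : List String :=
    match base_pattern with
    | none => ["IV Yr", "III Yr", "II Yr", "I Yr"]
    | some l => if l.isEmpty then ["IV Yr", "III Yr", "II Yr", "I Yr"] else l
  let active_years :=
    if include_empty then bp.filter (fun y => (d.get? y).isSome)
    else bp.filter (fun y =>
      match d.get? y with
      | some v => decide (0 < v.length)
      | none => false)
  match active_years with
  | [] => []
  | [y] => pvALoopSingle y cols []
  | _ => pvAOuter cols active_years []

-- ===== PORT B =====
-- Source B: build `first` (one pass with "" between adjacent equal years) by a fold, build the
-- repeating `period`, then list replication and a single slice; no per-column loop.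
def get_active_pattern_alt (year_dict : List (String × List String)) (cols : Int) (base_pattern : Option (List String)) (include_empty : Bool) : List String :=
  let d := PySem.Dict.ofList year_dict
  let given := base_pattern.getD []
  let base : List String := if given.isEmpty then ["IV Yr", "III Yr", "II Yr", "I Yr"] else given
  let active := base.filter (fun y =>
    (d.get? y).isSome && (include_empty || decide (0 < (d.getD y []).length)))
  match active with
  | [] => []
  | a :: as =>
    if cols ≤ 0 then []
    else
      let first := as.foldl (fun acc y => (if acc.getLast? == some y then acc ++ [""] else acc) ++ [y]) [a]
      let period := (if (a :: as).getLast? == some a then [""] else []) ++ first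
      let reps := PySem.Int.floordiv cols (period.length : Int) + 1
      (first ++ (List.replicate reps.toNat period).flatten).take cols.toNat

-- ===== PRECONDITION & SPEC =====
def Spec_get_active_pattern (year_dict : List (String × List String)) (cols : Int) (base_pattern : Option (List String)) (include_empty : Bool) (out : List String) : Prop := out = get_active_pattern_alt year_dict cols base_pattern include_empty
instance (year_dict : List (String × List String)) (cols : Int) (base_pattern : Option (List String)) (include_empty : Bool) (out : List String) : Decidable (Spec_get_active_pattern year_dict cols base_pattern include_empty out) := by unfold Spec_get_active_pattern; infer_instance

-- ===== CLAIM (what is proved, stated in full; the proofs are below) =====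
def Claim_equal_get_active_pattern : Prop := ∀ (year_dict : List (String × List String)) (cols : Int) (base_pattern : Option (List String)) (include_empty : Bool), Dom_get_active_pattern year_dict cols base_pattern include_empty → Spec_get_active_pattern year_dict cols base_pattern include_empty (get_active_pattern year_dict cols base_pattern include_empty)

-- ===== LEMMAS AND PROOFS =====

-- Proof-side model of A's column stream: cycle over `active` with adjacent-dedup,
-- truncated to `fuel` items (used only to connect the two ports; neither port uses it).
mutual
def pvBGen (active : List String) : Nat → List String → Option String → List String
  | 0, _, _ => []
  | Nat.succ n, queue, last =>
    match (if queue.isEmpty then active else queue) with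
    | y :: rest =>
      if last == some y then "" :: pvBPad active n y rest
      else y :: pvBGen active n rest (some y)
    | [] => []
  termination_by n _ _ => 2 * n + 1
  decreasing_by all_goals omega

def pvBPad (active : List String) : Nat → String → List String → List String
  | 0, _, _ => []
  | Nat.succ m, y, rest => y :: pvBGen active m rest (some y)
  termination_by m _ _ => 2 * m
  decreasing_by all_goals omega
end

theorem pvBGen_zero (active queue : List String) (last : Option String) :
    pvBGen active 0 queue last = [] := by
  rw [pvBGen.eq_def]

theorem pvBGen_cons (active : List String) (n : Nat) (y : String) (rest : List String) (last : Option String) :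
    pvBGen active (n + 1) (y :: rest) last
      = if last == some y then "" :: pvBPad active n y rest
        else y :: pvBGen active n rest (some y) := by
  rw [pvBGen.eq_def]
  simp

theorem pvBGen_refill (active : List String) (n : Nat) (last : Option String) :
    pvBGen active n [] last = pvBGen active n active last := by
  cases n with
  | zero => rw [pvBGen_zero, pvBGen_zero]
  | succ n =>
    cases active with
    | nil => rfl
    | cons a as =>
      rw [pvBGen.eq_def]
      conv_rhs => rw [pvBGen.eq_def]
      simp

-- A's falsy test on base_pattern equals B's getD-based one
theorem pvBase_eq (base_pattern : Option (List String)) (df : List String) :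
    (match base_pattern with
      | none => df
      | some l => if l.isEmpty then df else l)
    = (if (base_pattern.getD []).isEmpty then df else base_pattern.getD []) := by
  cases base_pattern with
  | none => simp
  | some l => simp

-- the two filter predicates agree, so both ports compute the same active list
theorem pvActive_eq (d : PySem.Dict String (List String)) (bp : List String) (include_empty : Bool) :
    (if include_empty then bp.filter (fun y => (d.get? y).isSome)
     else bp.filter (fun y =>
       match d.get? y with
       | some v => decide (0 < v.length)
       | none => false))
    = bp.filter (fun y =>
        (d.get? y).isSome && (include_empty || decide (0 < (d.getD y []).length))) := by
  cases include_empty with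
  | true => simp
  | false =>
    apply List.filter_congr
    intro y _
    cases h : d.get? y with
    | none => simp
    | some v => simp [h, PySem.Dict.getD_eq_get?_getD, Option.getD]

-- KEY LEMMA 1: A's nested loops produce exactly the dedup stream.
theorem pvKey (cols : Int) (a : String) (as : List String) :
    ∀ (n : Nat) (pat : List String) (y : String) (rest : List String),
      (cols - (pat.length : Int)).toNat = n → (pat.length : Int) < cols →
      pvAOuter cols (a :: as) (pvAInner cols (y :: rest) pat)
        = pat ++ pvBGen (a :: as) n (y :: rest) pat.getLast? := by
  intro n
  induction n using Nat.strong_induction_on with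
  | _ n ih =>
    intro pat y rest hn hlt
    obtain ⟨k, rfl⟩ : ∃ k, n = k + 1 := ⟨n - 1, by omega⟩
    simp only [pvAInner]
    rw [if_neg (by omega)]
    have hcond : (decide (0 < pat.length) && (pat.getLast? == some y)) = (pat.getLast? == some y) := by
      cases pat with
      | nil => simp
      | cons p ps => simp
    rw [hcond]
    by_cases hded : pat.getLast? == some y
    · rw [if_pos hded, pvBGen_cons, if_pos hded]
      by_cases hfull : ((pat ++ [""]).length : Int) ≥ cols
      · have hk : k = 0 := by simp only [List.length_append, List.length_cons, List.length_nil] at hfull; omega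
        subst hk
        have hnl : ¬ ((pat ++ [""]).length : Int) < cols := by omega
        rw [if_pos hfull, pvAOuter, dif_neg hnl]
        simp [pvBPad]
      · rw [if_neg hfull]
        simp only [List.length_append, List.length_cons, List.length_nil] at hfull
        obtain ⟨m, rfl⟩ : ∃ m, k = m + 1 := ⟨k - 1, by omega⟩
        simp only [pvBPad]
        have hlast : (pat ++ [""] ++ [y]).getLast? = some y := by simp
        have hlen : (pat ++ [""] ++ [y]).length = pat.length + 2 := by simp
        have hm : (cols - ((pat ++ [""] ++ [y]).length : Int)).toNat = m := by
          rw [hlen]; push_cast; omega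
        cases rest with
        | cons z rs =>
          by_cases hlt2 : ((pat ++ [""] ++ [y]).length : Int) < cols
          · rw [ih m (by omega) (pat ++ [""] ++ [y]) z rs hm hlt2, hlast]
            simp
          · have hm0 : m = 0 := by rw [hlen] at hlt2; push_cast at hlt2; omega
            subst hm0
            simp only [pvAInner]
            rw [if_pos (by omega), pvAOuter, dif_neg hlt2, pvBGen_zero]
            simp
        | nil =>
          simp only [pvAInner]
          by_cases hlt2 : ((pat ++ [""] ++ [y]).length : Int) < cols
          · rw [pvAOuter, dif_pos hlt2,
              ih m (by omega) (pat ++ [""] ++ [y]) a as hm hlt2, hlast,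
              pvBGen_refill]
            simp
          · have hm0 : m = 0 := by rw [hlen] at hlt2; push_cast at hlt2; omega
            subst hm0
            rw [pvAOuter, dif_neg hlt2, pvBGen_zero]
            simp
    · rw [if_neg hded, pvBGen_cons, if_neg hded]
      have hlast : (pat ++ [y]).getLast? = some y := by simp
      have hlen : (pat ++ [y]).length = pat.length + 1 := by simp
      have hk : (cols - ((pat ++ [y]).length : Int)).toNat = k := by
        rw [hlen]; push_cast; omega
      cases rest with
      | cons z rs =>
        by_cases hlt2 : ((pat ++ [y]).length : Int) < cols
        · rw [ih k (by omega) (pat ++ [y]) z rs hk hlt2, hlast]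
          simp
        · have hk0 : k = 0 := by rw [hlen] at hlt2; push_cast at hlt2; omega
          subst hk0
          simp only [pvAInner]
          rw [if_pos (by omega), pvAOuter, dif_neg hlt2, pvBGen_zero]
      | nil =>
        simp only [pvAInner]
        by_cases hlt2 : ((pat ++ [y]).length : Int) < cols
        · rw [pvAOuter, dif_pos hlt2,
            ih k (by omega) (pat ++ [y]) a as hk hlt2, hlast, pvBGen_refill]
          simp
        · have hk0 : k = 0 := by rw [hlen] at hlt2; push_cast at hlt2; omega
          subst hk0
          rw [pvAOuter, dif_neg hlt2, pvBGen_zero]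

-- the y,"",y,"",… prefix of length n (A's single-year loop result)
def pvSingleStream (y : String) : Nat → List String
  | 0 => []
  | 1 => [y]
  | (m + 2) => y :: "" :: pvSingleStream y m

-- the "",y,"",y,… prefix of length n
def pvAltStream (y : String) : Nat → List String
  | 0 => []
  | 1 => [""]
  | (m + 2) => "" :: y :: pvAltStream y m

theorem pvALoopSingle_eq (y : String) (cols : Int) :
    ∀ (n : Nat) (pat : List String), (cols - (pat.length : Int)).toNat = n →
      pvALoopSingle y cols pat = pat ++ pvSingleStream y n := by
  intro n
  induction n using Nat.strong_induction_on with
  | _ n ih =>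
    intro pat hn
    rw [pvALoopSingle]
    by_cases h1 : (pat.length : Int) < cols
    · rw [dif_pos h1]
      by_cases h2 : ((pat ++ [y]).length : Int) < cols
      · have hlen : (pat ++ [y] ++ [""]).length = pat.length + 2 := by simp
        have h2' : (pat.length : Int) + 1 < cols := by
          simpa using h2
        obtain ⟨m, rfl⟩ : ∃ m, n = m + 2 := ⟨n - 2, by omega⟩
        rw [if_pos h2,
          ih m (by omega) (pat ++ [y] ++ [""]) (by rw [hlen]; push_cast; omega)]
        simp [pvSingleStream]
      · have hn1 : n = 1 := by simp only [List.length_append, List.length_cons, List.length_nil] at h2; omega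
        rw [if_neg h2, hn1]
        rfl
    · have hn0 : n = 0 := by omega
      rw [dif_neg h1, hn0]
      simp [pvSingleStream]

theorem pvBGen_single_alt (y : String) :
    ∀ (k : Nat), pvBGen [y] k [] (some y) = pvAltStream y k := by
  intro k
  induction k using Nat.strong_induction_on with
  | _ k ih =>
    match k with
    | 0 => simp [pvBGen_zero, pvAltStream]
    | Nat.succ j =>
      rw [pvBGen_refill]
      simp only [pvBGen_cons, BEq.rfl, if_true]
      match j with
      | 0 => simp [pvBPad, pvAltStream]
      | Nat.succ m =>
        simp only [pvBPad]
        rw [ih m (by omega)]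
        rfl

theorem pvSingle_alt_succ (y : String) :
    ∀ (k : Nat), y :: pvAltStream y k = pvSingleStream y (k + 1) := by
  intro k
  induction k using Nat.strong_induction_on with
  | _ k ih =>
    match k with
    | 0 => rfl
    | 1 => rfl
    | Nat.succ (Nat.succ m) =>
      show y :: "" :: y :: pvAltStream y m = pvSingleStream y (m + 3)
      rw [ih m (by omega)]
      rfl

theorem pvBGen_single (y : String) (n : Nat) :
    pvBGen [y] n [y] none = pvSingleStream y n := by
  cases n with
  | zero => simp only [pvBGen_zero, pvSingleStream]
  | succ k =>
    simp only [pvBGen_cons]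
    have hne : ((none : Option String) == some y) = false := rfl
    rw [hne]
    simp only [Bool.false_eq_true, if_false]
    rw [pvBGen_single_alt y k, pvSingle_alt_succ y k]

-- A's four-way branch equals the dedup stream (for any active list)
theorem pvBranch_eq (cols : Int) (active : List String) :
    (match active with
      | [] => []
      | [y] => pvALoopSingle y cols []
      | _ => pvAOuter cols active [])
    = (if active.isEmpty then [] else pvBGen active cols.toNat active none) := by
  match active with
  | [] => rfl
  | [y] =>
    simp only [List.isEmpty_cons, Bool.false_eq_true, if_false]
    rw [pvALoopSingle_eq y cols cols.toNat [] (by simp), pvBGen_single]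
    simp
  | a :: b :: rest =>
    simp only [List.isEmpty_cons, Bool.false_eq_true, if_false]
    by_cases hc : (0 : Int) < cols
    · rw [pvAOuter, dif_pos (by simpa using hc),
        pvKey cols a (b :: rest) cols.toNat [] a (b :: rest) (by simp) (by simpa using hc)]
      simp
    · have h0 : cols.toNat = 0 := by omega
      rw [pvAOuter, dif_neg (by simpa using hc), h0, pvBGen_zero]

-- ===== the stream is eventually periodic: intra-pass expansion, the period, tiling =====

-- dedup expansion of one pass over q, given the previously emitted element o
def pvIntra : List String → Option String → List String
  | [], _ => []
  | y :: r, o => (if o == some y then ["", y] else [y]) ++ pvIntra r (some y)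

def pvLastO (q : List String) (o : Option String) : Option String :=
  match q.getLast? with
  | some z => some z
  | none => o

theorem pvIntra_cons_length_pos (y : String) (r : List String) (o : Option String) :
    0 < (pvIntra (y :: r) o).length := by
  simp only [pvIntra]
  split <;> simp

theorem pvLastO_cons (y : String) (r : List String) (o : Option String) :
    pvLastO (y :: r) o = pvLastO r (some y) := by
  cases hr : r.getLast? with
  | some z => simp [pvLastO, List.getLast?_cons, hr]
  | none =>
    have : r = [] := by cases r with | nil => rfl | cons b bs => simp [List.getLast?_eq_getLast] at hr
    subst this
    simp [pvLastO]

-- KEY LEMMA 2 (mid-pass): the stream equals the pass expansion followed by the wrapped stream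
theorem pvMid (active : List String) :
    ∀ (q : List String) (o : Option String) (n : Nat),
      pvBGen active n q o =
        if n ≤ (pvIntra q o).length then (pvIntra q o).take n
        else pvIntra q o ++ pvBGen active (n - (pvIntra q o).length) [] (pvLastO q o) := by
  intro q
  induction q with
  | nil =>
    intro o n
    cases n with
    | zero => simp [pvBGen_zero, pvIntra]
    | succ m => simp [pvIntra, pvLastO]
  | cons y r ih =>
    intro o n
    cases n with
    | zero =>
      rw [pvBGen_zero, if_pos (by omega)]
      simp
    | succ m =>
      rw [pvBGen_cons, pvLastO_cons]
      by_cases hded : o == some y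
      · rw [if_pos hded]
        simp only [pvIntra, hded, if_true]
        cases m with
        | zero =>
          simp [pvBPad]
        | succ j =>
          simp only [pvBPad]
          rw [ih (some y) j]
          simp only [List.length_append, List.length_cons, List.length_nil]
          by_cases hle : j ≤ (pvIntra r (some y)).length
          · rw [if_pos hle, if_pos (by omega)]
            simp [List.take_succ_cons]
          · rw [if_neg hle, if_neg (by omega)]
            have h2 : j + 1 + 1 - (0 + 1 + 1 + (pvIntra r (some y)).length)
                = j - (pvIntra r (some y)).length := by omega
            rw [h2]
            simp
      · rw [if_neg hded]
        have hded' : (o == some y) = false := by simpa using hded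
        simp only [pvIntra, hded', Bool.false_eq_true, if_false]
        rw [ih (some y) m]
        simp only [List.length_append, List.length_cons, List.length_nil]
        by_cases hle : m ≤ (pvIntra r (some y)).length
        · rw [if_pos hle, if_pos (by omega)]
          simp [List.take_succ_cons]
        · rw [if_neg hle, if_neg (by omega)]
          have h2 : m + 1 - (0 + 1 + (pvIntra r (some y)).length)
              = m - (pvIntra r (some y)).length := by omega
          rw [h2]
          simp

-- prefix of length n of the infinite repetition of p (guard branch only for p = [])
def pvCyc (p : List String) (n : Nat) : List String :=
  if h : n ≤ p.length ∨ p = [] then p.take n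
  else p ++ pvCyc p (n - p.length)
termination_by n
decreasing_by
  rcases not_or.mp h with ⟨h1, h2⟩
  have : 0 < p.length := List.length_pos_of_ne_nil h2
  omega

-- KEY LEMMA 3: the wrapped stream is exactly the repetition of the period
theorem pvWrap (a : String) (as : List String) (l : String)
    (hl : (a :: as).getLast? = some l) :
    ∀ (n : Nat), pvBGen (a :: as) n [] (some l) = pvCyc (pvIntra (a :: as) (some l)) n := by
  intro n
  induction n using Nat.strong_induction_on with
  | _ n ih =>
    rw [pvBGen_refill, pvMid (a :: as) (a :: as) (some l) n]
    have hlast : pvLastO (a :: as) (some l) = some l := by simp [pvLastO, hl]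
    have hpos := pvIntra_cons_length_pos a as (some l)
    by_cases hle : n ≤ (pvIntra (a :: as) (some l)).length
    · rw [if_pos hle, pvCyc, dif_pos (Or.inl hle)]
    · have hne : pvIntra (a :: as) (some l) ≠ [] := by
        simp only [pvIntra]; split <;> simp
      rw [if_neg hle, hlast, ih (n - (pvIntra (a :: as) (some l)).length) (by omega)]
      conv_rhs => rw [pvCyc]
      rw [dif_neg (by rw [not_or]; exact ⟨by omega, hne⟩)]

-- KEY LEMMA 4 (tiling): a long enough finite tiling of p, truncated, is pvCyc
theorem pvTileTake (p : List String) :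
    ∀ (k m : Nat), m ≤ k * p.length →
      ((List.replicate k p).flatten).take m = pvCyc p m := by
  intro k
  induction k with
  | zero =>
    intro m hm
    simp only [Nat.zero_mul, Nat.le_zero] at hm
    subst hm
    rw [pvCyc, dif_pos (by omega)]
    simp
  | succ k ih =>
    intro m hm
    simp only [List.replicate_succ, List.flatten_cons]
    by_cases hle : m ≤ p.length
    · have h0 : m - p.length = 0 := by omega
      rw [List.take_append, h0, List.take_zero, List.append_nil, pvCyc, dif_pos (Or.inl hle)]
    · have hp : p ≠ [] := by
        intro h; subst h; simp at hm hle; omega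
      rw [List.take_append, List.take_of_length_le (by omega), pvCyc,
        dif_neg (by rw [not_or]; exact ⟨hle, hp⟩), ih (m - p.length) (by
          have h3 : (k + 1) * p.length = k * p.length + p.length := by ring
          have h4 : 0 < p.length := List.length_pos_of_ne_nil hp
          omega)]

-- B's fold builds exactly the pass expansion
theorem pvFold_eq (as : List String) :
    ∀ (acc : List String) (z : String), acc.getLast? = some z →
      as.foldl (fun acc y => (if acc.getLast? == some y then acc ++ [""] else acc) ++ [y]) acc
        = acc ++ pvIntra as (some z) := by
  induction as with
  | nil => intro acc z _; simp [pvIntra]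
  | cons y r ih =>
    intro acc z hz
    simp only [List.foldl_cons, pvIntra]
    rw [hz]
    by_cases hc : (some z == some y)
    · rw [if_pos hc, ih ((acc ++ [""]) ++ [y]) y (by simp), hc]
      simp
    · rw [if_neg hc, ih (acc ++ [y]) y (by simp), if_neg hc]
      simp

-- period = pvIntra active (some last)
theorem pvPeriod_eq (a : String) (as : List String) (l : String)
    (hl : (a :: as).getLast? = some l) :
    (if (a :: as).getLast? == some a then [""] else []) ++ ([a] ++ pvIntra as (some a))
      = pvIntra (a :: as) (some l) := by
  rw [hl]
  simp only [pvIntra]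
  by_cases hc : (some l == some a)
  · rw [if_pos (by simpa using hc), if_pos hc]
    simp
  · rw [if_neg (by simpa using hc), if_neg hc]
    simp

-- ===== the assembled equality on a shared active list =====
theorem pvMain (cols : Int) (hc : -2147483648 ≤ cols ∧ cols ≤ 2147483648) (active : List String) :
    (match active with
      | [] => []
      | [y] => pvALoopSingle y cols []
      | _ => pvAOuter cols active [])
    = (match active with
      | [] => []
      | a :: as =>
        if cols ≤ 0 then []
        else
          let first := as.foldl (fun acc y => (if acc.getLast? == some y then acc ++ [""] else acc) ++ [y]) [a]
          let period := (if (a :: as).getLast? == some a then [""] else []) ++ first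
          let reps := PySem.Int.floordiv cols (period.length : Int) + 1
          (first ++ (List.replicate reps.toNat period).flatten).take cols.toNat) := by
  rw [pvBranch_eq]
  match active with
  | [] => rfl
  | a :: as =>
    simp only [List.isEmpty_cons, Bool.false_eq_true, if_false]
    by_cases hc0 : cols ≤ 0
    · rw [if_pos hc0]
      have : cols.toNat = 0 := by omega
      rw [this, pvBGen_zero]
    · rw [if_neg hc0]
      obtain ⟨m, rfl⟩ : ∃ m : Nat, cols = (m : Int) := ⟨cols.toNat, by omega⟩
      obtain ⟨l, hl⟩ : ∃ l, (a :: as).getLast? = some l := by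
        cases h : (a :: as).getLast? with
        | some z => exact ⟨z, rfl⟩
        | none => simp at h
      set I := pvIntra as (some a) with hI
      have hfirst : as.foldl (fun acc y => (if acc.getLast? == some y then acc ++ [""] else acc) ++ [y]) [a] = [a] ++ I := pvFold_eq as [a] a (by simp)
      set first := [a] ++ I with hf
      set P := pvIntra (a :: as) (some l) with hP
      have hperiod : (if (a :: as).getLast? == some a then [""] else []) ++ first = P :=
        pvPeriod_eq a as l hl
      have hfirstI : pvIntra (a :: as) none = first := by
        simp only [pvIntra, hf, hI]
        norm_num
      have hPpos : 0 < P.length := pvIntra_cons_length_pos a as (some l)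
      have hLpos : (0 : Int) < ((P.length : Nat) : Int) := by exact_mod_cast hPpos
      simp only [Int.toNat_natCast]
      -- left side: stream → pass expansion followed by the periodic continuation
      rw [pvMid (a :: as) (a :: as) none m, hfirstI]
      have hlastO : pvLastO (a :: as) none = some l := by simp [pvLastO, hl]
      -- right side arithmetic: reps = m / |P| + 1
      have hreps : (PySem.Int.floordiv (m : Int) ((P.length : Nat) : Int) + 1).toNat = m / P.length + 1 := by
        rw [PySem.Int.floordiv_natCast]
        generalize m / P.length = q
        omega
      have hbound : m - first.length ≤ (m / P.length + 1) * P.length := by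
        have h1 : m / P.length * P.length + m % P.length = m := by
          rw [Nat.mul_comm (m / P.length) P.length]; exact Nat.div_add_mod m P.length
        have h2 : m % P.length < P.length := Nat.mod_lt m hPpos
        calc m - first.length ≤ m := Nat.sub_le _ _
          _ ≤ m / P.length * P.length + P.length := by omega
          _ = (m / P.length + 1) * P.length := by ring
      rw [hfirst, hperiod, hreps]
      by_cases hle : m ≤ first.length
      · rw [if_pos hle]
        conv_rhs => rw [List.take_append]
        have h0 : m - first.length = 0 := by omega
        rw [h0, List.take_zero, List.append_nil]
      · rw [if_neg hle, hlastO, pvWrap a as l hl]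
        conv_rhs => rw [List.take_append]
        rw [List.take_of_length_le (by omega),
          pvTileTake P (m / P.length + 1) (m - first.length) hbound]

-- ===== VERDICT (by name: the statement is the Claim_ definition above) =====
theorem get_active_pattern_spec : Claim_equal_get_active_pattern := by
  intro year_dict cols base_pattern include_empty hdom
  unfold Spec_get_active_pattern
  have hc : -2147483648 ≤ cols ∧ cols ≤ 2147483648 := by
    unfold Dom_get_active_pattern at hdom
    simp only [Bool.and_eq_true, pvDomInt, decide_eq_true_eq] at hdom
    exact hdom.1.2
  simp only [get_active_pattern, get_active_pattern_alt]
  rw [pvBase_eq, pvActive_eq]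
  exact pvMain cols hc _
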